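-- pv_equiv track=rewrite | github.com/dzungcamlang/content-extraction | internal/handler/extract_data.py | __get_content_path
-- ===== SOURCE A (Python) =====
-- def __get_content_path(title_path='', content_paths=[]):
--     title_path_elements = title_path.split(' ')
--
--     while len(title_path_elements) > 0:
--         current_title_path = ' '.join(title_path_elements)
--
--         total_match = 0
--         for content_path in content_paths:
--             if content_path.find(current_title_path) > -1:
--                 total_match += 1
--
--         if total_match == len(content_paths):
--             return current_title_path
--
--         title_path_elements.pop()
--
--     return ''
-- ===== SOURCE B (Python) =====
-- def __get_content_path(title_path='', content_paths=[]):
--     # Binary search over the word count: "all paths contain the first k words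
--     # joined" is monotone in k (a shorter space-joined prefix is a prefix of a
--     # longer one), so the largest matching k is found in O(log W) checks.
--     words = title_path.split(' ')
--
--     def ok(k):
--         prefix = ' '.join(words[:k])
--         return all(path.find(prefix) > -1 for path in content_paths)
--
--     lo, hi = 0, len(words)
--     while lo < hi:
--         mid = (lo + hi + 1) // 2
--         if ok(mid):
--             lo = mid
--         else:
--             hi = mid - 1
--     return ' '.join(words[:lo])
-- ===== Notes on version B (the rewrite author's own statement) =====
-- stated objective: faster
-- what changed: A scans word counts downward one at a time, re-testing all paths at each count; B binary-searches the word count, exploiting that containment of the space-joined k-word prefix in every path is monotone in k.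
import Mathlib
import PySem

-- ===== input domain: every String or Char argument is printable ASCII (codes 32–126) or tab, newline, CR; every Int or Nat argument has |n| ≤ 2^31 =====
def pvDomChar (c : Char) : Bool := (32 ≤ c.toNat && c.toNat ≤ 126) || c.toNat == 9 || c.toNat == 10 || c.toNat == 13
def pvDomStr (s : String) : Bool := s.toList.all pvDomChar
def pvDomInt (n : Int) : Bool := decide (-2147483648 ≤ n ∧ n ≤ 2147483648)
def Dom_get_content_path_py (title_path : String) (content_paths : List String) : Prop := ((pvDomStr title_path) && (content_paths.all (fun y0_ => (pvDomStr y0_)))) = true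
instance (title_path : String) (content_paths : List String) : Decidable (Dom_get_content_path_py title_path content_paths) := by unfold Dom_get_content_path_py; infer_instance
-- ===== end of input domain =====

-- B replaces A's linear downward scan over word counts by a binary search over the
-- word count (the containment test is monotone across nested space-joined prefixes):
-- O(log W) containment rounds instead of O(W). Objective: faster.

-- ===== PORT A =====
-- the while loop: elements.pop() = dropLast, guard len(elements) > 0
def pvALoop (content_paths : List String) (elements : List String) : String :=
  if elements.length > 0 then
    let current := PySem.Str.join " " elements
    let total : Int := content_paths.foldl
      (fun acc p => if PySem.Str.find p current > -1 then acc + 1 else acc) 0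
    if total = (content_paths.length : Int) then current
    else pvALoop content_paths elements.dropLast
  else ""
termination_by elements.length
decreasing_by simp [List.length_dropLast]; omega

def get_content_path_py (title_path : String) (content_paths : List String) : String :=
  -- title_path.split(' '): the separator " " is nonempty, so split? is always some
  pvALoop content_paths ((PySem.Str.split? title_path " ").getD [])

-- ===== PORT B =====
-- ok(k) from Source B: all(path.find(' '.join(words[:k])) > -1 for path in content_paths)
def pvOk (words content_paths : List String) (k : Nat) : Bool :=
  let pre := PySem.Str.join " " (words.take k)
  content_paths.all (fun p => PySem.Str.find p pre > -1)

-- the while lo < hi loop; lo, hi stay within 0..len(words), so Nat with (lo+hi+1)/2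
-- = Python's (lo+hi+1)//2 on these nonnegative values
def pvBSearch (words content_paths : List String) (lo hi : Nat) : Nat :=
  if lo < hi then
    let mid := (lo + hi + 1) / 2
    if pvOk words content_paths mid then pvBSearch words content_paths mid hi
    else pvBSearch words content_paths lo (mid - 1)
  else lo
termination_by hi - lo
decreasing_by all_goals omega

def get_content_path_py_alt (title_path : String) (content_paths : List String) : String :=
  let words := (PySem.Str.split? title_path " ").getD []
  PySem.Str.join " " (words.take (pvBSearch words content_paths 0 words.length))

-- ===== PRECONDITION & SPEC =====
def Spec_get_content_path_py (title_path : String) (content_paths : List String) (out : String) : Prop := out = get_content_path_py_alt title_path content_paths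
instance (title_path : String) (content_paths : List String) (out : String) : Decidable (Spec_get_content_path_py title_path content_paths out) := by unfold Spec_get_content_path_py; infer_instance

-- ===== CLAIM (what is proved, stated in full; the proofs are below) =====
def Claim_equal_get_content_path_py : Prop := ∀ (title_path : String) (content_paths : List String), Dom_get_content_path_py title_path content_paths → Spec_get_content_path_py title_path content_paths (get_content_path_py title_path content_paths)

-- ===== LEMMAS AND PROOFS =====

theorem joinTakePrefixC (ws : List (List Char)) (j : Nat) :
    PySem.Chars.join [' '] (ws.take j) <+: PySem.Chars.join [' '] ws := by
  induction ws generalizing j with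
  | nil => simp
  | cons w t ih =>
    cases j with
    | zero => simp [PySem.Chars.join_nil]
    | succ j' =>
      simp only [List.take_succ_cons]
      cases t with
      | nil => simp
      | cons b t' =>
        cases hjt : (b :: t').take j' with
        | nil =>
          have : j' = 0 := by cases j' <;> simp_all
          subst this
          simp [PySem.Chars.join_singleton, PySem.Chars.join_cons_cons]
        | cons c r =>
          rw [PySem.Chars.join_cons_cons, PySem.Chars.join_cons_cons]
          rw [List.append_assoc, List.append_assoc]
          refine (List.prefix_append_right_inj w).mpr ?_
          refine (List.prefix_append_right_inj [' ']).mpr ?_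
          have := ih j'
          rwa [hjt] at this

theorem pv_join_take_prefix (words : List String) (j k : Nat) (h : j ≤ k) :
    (PySem.Str.join " " (words.take j)).toList <+: (PySem.Str.join " " (words.take k)).toList := by
  rw [PySem.Str.toList_join, PySem.Str.toList_join]
  have hsep : " ".toList = [' '] := by decide
  rw [hsep]
  have : List.map String.toList (words.take j)
      = (List.map String.toList (words.take k)).take j := by
    rw [← List.map_take, List.take_take, Nat.min_eq_left h]
  rw [this]
  exact joinTakePrefixC _ j


theorem pv_ok_mono (words content_paths : List String) {j k : Nat} (h : j ≤ k)
    (hk : pvOk words content_paths k = true) : pvOk words content_paths j = true := by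
  simp only [pvOk, List.all_eq_true, decide_eq_true_eq] at hk ⊢
  intro p hp
  have h1 := hk p hp
  have h2 : 0 ≤ PySem.Str.find p (PySem.Str.join " " (words.take k)) := by omega
  rw [PySem.Str.find_nonneg_iff] at h2
  have h3 : 0 ≤ PySem.Str.find p (PySem.Str.join " " (words.take j)) := by
    rw [PySem.Str.find_nonneg_iff]
    exact ((pv_join_take_prefix words j k h).isInfix).trans h2
  omega

theorem pv_ok_zero (words content_paths : List String) : pvOk words content_paths 0 = true := by
  simp only [pvOk, List.all_eq_true, decide_eq_true_eq]
  intro p hp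
  have : PySem.Str.find p (PySem.Str.join " " (words.take 0)) = 0 := by
    have : PySem.Str.join " " (words.take 0) = "" := by rw [List.take_zero]; decide
    rw [this, PySem.Str.find_eq]
    simp [PySem.Chars.find_nil]
  omega


theorem pv_total_eq_ok (content_paths : List String) (cur : String) :
    (content_paths.foldl (fun acc p => if PySem.Str.find p cur > -1 then acc + 1 else acc) (0:Int)
      = (content_paths.length : Int))
    ↔ content_paths.all (fun p => PySem.Str.find p cur > -1) = true := by
  rw [PySem.List.foldl_ite_add_one (fun p => PySem.Str.find p cur > -1) content_paths 0]
  simp only [zero_add, Nat.cast_inj, List.all_eq_true, decide_eq_true_eq]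
  constructor
  · intro h
    have := List.countP_eq_length.mp (by exact_mod_cast h)
    intro p hp; simpa using this p hp
  · intro h
    exact_mod_cast List.countP_eq_length.mpr (by intro p hp; simpa using h p hp)

theorem pv_aLoop_eq (content_paths words : List String) (k : Nat) (hk : k ≤ words.length) :
    pvALoop content_paths (words.take k)
      = PySem.Str.join " " (words.take (Nat.findGreatest (fun i => pvOk words content_paths i = true) k)) := by
  induction k with
  | zero =>
    rw [pvALoop]
    simp [Nat.findGreatest_zero]
    decide
  | succ k ih =>
    rw [pvALoop]
    have hlen : (words.take (k+1)).length = k + 1 := by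
      rw [List.length_take]; omega
    rw [Nat.findGreatest_succ]
    simp only [hlen]
    have hcond : (0 : Nat) < k + 1 := by omega
    rw [if_pos hcond]
    have hok' : pvOk words content_paths (k+1)
        = content_paths.all (fun p => PySem.Str.find p (PySem.Str.join " " (words.take (k+1))) > -1) := rfl
    by_cases hok : pvOk words content_paths (k + 1) = true
    · rw [if_pos ((pv_total_eq_ok content_paths _).mpr (hok' ▸ hok)), if_pos hok]
    · rw [if_neg (fun hc => hok (hok' ▸ (pv_total_eq_ok content_paths _).mp hc)), if_neg hok]
      rw [List.dropLast_eq_take, List.take_take, List.length_take]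
      have : min (min (k + 1) words.length - 1) (k + 1) = k := by omega
      rw [this]
      exact ih (by omega)


theorem pv_bsearch_eq (words content_paths : List String) (lo hi : Nat)
    (hhi : hi ≤ words.length)
    (hlo : lo ≤ Nat.findGreatest (fun i => pvOk words content_paths i = true) words.length)
    (hhi2 : Nat.findGreatest (fun i => pvOk words content_paths i = true) words.length ≤ hi) :
    pvBSearch words content_paths lo hi
      = Nat.findGreatest (fun i => pvOk words content_paths i = true) words.length := by
  set M := Nat.findGreatest (fun i => pvOk words content_paths i = true) words.length with hM
  have hokM : pvOk words content_paths M = true := by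
    have := Nat.findGreatest_spec (P := fun i => pvOk words content_paths i = true)
      (Nat.zero_le words.length) (pv_ok_zero words content_paths)
    simpa [hM] using this
  clear_value M
  induction lo, hi using pvBSearch.induct words content_paths with
  | case1 lo hi hlt mid hok ih =>
    rw [pvBSearch, if_pos hlt, if_pos hok]
    exact ih hhi (hM ▸ Nat.le_findGreatest (by omega) hok) hhi2
  | case2 lo hi hlt mid hok ih =>
    rw [pvBSearch, if_pos hlt, if_neg hok]
    refine ih (by omega) hlo ?_
    have : ¬ mid ≤ M := fun hle => hok (pv_ok_mono words content_paths hle hokM)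
    omega
  | case3 lo hi hlt =>
    rw [pvBSearch, if_neg hlt]
    omega

-- ===== VERDICT (by name: the statement is the Claim_ definition above) =====
theorem get_content_path_py_spec : Claim_equal_get_content_path_py := by
  intro title_path content_paths _
  unfold Spec_get_content_path_py get_content_path_py get_content_path_py_alt
  simp only []
  rw [pv_bsearch_eq _ content_paths 0 _ le_rfl (Nat.zero_le _) (Nat.findGreatest_le _)]
  have h := pv_aLoop_eq content_paths ((PySem.Str.split? title_path " ").getD []) _ le_rfl
  rwa [List.take_length] at h
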